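-- pv_equiv track=rewrite | github.com/Elinam03/Signature-Forge | backend/app/services/signature.py | get_max_consecutive_wildcards
-- ===== SOURCE A (Python) =====
-- from typing import Optional
--
-- def get_max_consecutive_wildcards(pattern_bytes: list[Optional[int]]) -> int:
--     """Count maximum consecutive wildcards in pattern."""
--     max_consecutive = 0
--     current = 0
--
--     for byte in pattern_bytes:
--         if byte is None:
--             current += 1
--             max_consecutive = max(max_consecutive, current)
--         else:
--             current = 0
--
--     return max_consecutive
-- ===== SOURCE B (Python) =====
-- from itertools import groupby
-- from typing import Optional
--
--
-- def get_max_consecutive_wildcards(pattern_bytes: list[Optional[int]]) -> int: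
--     """Count maximum consecutive wildcards in pattern."""
--     return max(
--         (sum(1 for _ in group)
--          for is_wild, group in groupby(pattern_bytes, key=lambda b: b is None)
--          if is_wild),
--         default=0,
--     )
-- ===== Notes on version B (the rewrite author's own statement) =====
-- stated objective: idiomatic
-- what changed: Replaces the running max/current counter pair with an itertools.groupby pass: group consecutive elements by 'is None', take the lengths of the None-groups, and reduce with max(default=0).
import Mathlib
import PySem

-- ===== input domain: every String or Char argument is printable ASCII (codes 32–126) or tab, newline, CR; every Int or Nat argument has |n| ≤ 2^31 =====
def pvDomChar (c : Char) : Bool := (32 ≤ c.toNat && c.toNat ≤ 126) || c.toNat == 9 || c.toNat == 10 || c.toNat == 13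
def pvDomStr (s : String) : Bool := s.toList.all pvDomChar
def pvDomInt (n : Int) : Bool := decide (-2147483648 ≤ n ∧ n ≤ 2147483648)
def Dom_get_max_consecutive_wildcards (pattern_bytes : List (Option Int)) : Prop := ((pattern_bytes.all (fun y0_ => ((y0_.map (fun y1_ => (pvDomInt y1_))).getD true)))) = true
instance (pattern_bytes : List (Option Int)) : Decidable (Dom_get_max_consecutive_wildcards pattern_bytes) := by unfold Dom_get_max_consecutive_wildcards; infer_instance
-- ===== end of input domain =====

-- B replaces A's running max/current counter pair by an itertools.groupby-style pass:
-- group consecutive elements by "is None", take the lengths of the None-groups, max with default 0.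
-- Same O(n) cost; objective: idiomatic.

-- ===== PORT A =====
def get_max_consecutive_wildcards (pattern_bytes : List (Option Int)) : Int :=
  (pattern_bytes.foldl
    (fun (st : Int × Int) byte =>
      match byte with
      | none => (max st.1 (st.2 + 1), st.2 + 1)   -- current += 1; max_consecutive = max(max_consecutive, current)
      | some _ => (st.1, 0))                       -- current = 0
    (0, 0)).1

-- ===== PORT B =====
-- itertools.groupby(pattern_bytes, key=lambda b: b is None), each group as (key, length)
def pvGroupRuns (xs : List (Option Int)) : List (Bool × Int) :=
  match xs with
  | [] => []
  | x :: rest =>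
    match pvGroupRuns rest with
    | (k, n) :: more =>
      if x.isNone = k then (k, n + 1) :: more else (x.isNone, 1) :: (k, n) :: more
    | [] => [(x.isNone, 1)]

-- max((len of group for is_wild, group in groupby(...) if is_wild), default=0)
def get_max_consecutive_wildcards_alt (pattern_bytes : List (Option Int)) : Int :=
  (PySem.List.max? (((pvGroupRuns pattern_bytes).filter (fun p => p.1)).map (fun p => p.2))
      (fun x => x)).getD 0

-- ===== PRECONDITION & SPEC =====
def Spec_get_max_consecutive_wildcards (pattern_bytes : List (Option Int)) (out : Int) : Prop := out = get_max_consecutive_wildcards_alt pattern_bytes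
instance (pattern_bytes : List (Option Int)) (out : Int) : Decidable (Spec_get_max_consecutive_wildcards pattern_bytes out) := by unfold Spec_get_max_consecutive_wildcards; infer_instance

-- ===== CLAIM (what is proved, stated in full; the proofs are below) =====
def Claim_equal_get_max_consecutive_wildcards : Prop := ∀ (pattern_bytes : List (Option Int)), Dom_get_max_consecutive_wildcards pattern_bytes → Spec_get_max_consecutive_wildcards pattern_bytes (get_max_consecutive_wildcards pattern_bytes)

-- ===== LEMMAS AND PROOFS =====

-- "max consecutive Nones seen from here, a run of length c open to the left"
def pvH : Int → List (Option Int) → Int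
  | _, [] => 0
  | c, none :: t => max (c + 1) (pvH (c + 1) t)
  | _, some _ :: t => pvH 0 t

-- reduce a run list: max of the lengths of the true-keyed runs, 0 if none
def pvK (rs : List (Bool × Int)) : Int :=
  rs.foldl (fun m p => if p.1 then max m p.2 else m) 0

lemma pvGroupRuns_pos (xs : List (Option Int)) :
    ∀ p ∈ pvGroupRuns xs, 1 ≤ p.2 := by
  induction xs with
  | nil => simp [pvGroupRuns]
  | cons x t ih =>
    intro p hp
    simp only [pvGroupRuns] at hp
    rcases hruns : pvGroupRuns t with _ | ⟨⟨k, n⟩, more⟩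
    · rw [hruns] at hp; simp at hp; simp [hp]
    · rw [hruns] at hp
      have hn : (1 : Int) ≤ n := by
        simpa using ih (k, n) (by rw [hruns]; simp)
      by_cases h : x.isNone = k
      · simp [h] at hp
        rcases hp with hp | hp
        · subst hp; simp; omega
        · exact ih p (by rw [hruns]; simp [hp])
      · simp [h] at hp
        rcases hp with hp | hp | hp
        · subst hp; simp
        · subst hp; simpa using hn
        · exact ih p (by rw [hruns]; simp [hp])

-- folding the run reducer from a nonneg seed a = max a (fold from 0), given positive lengths
lemma pvK_init (rs : List (Bool × Int)) (a : Int) (ha : 0 ≤ a)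
    (hpos : ∀ p ∈ rs, 1 ≤ p.2) :
    rs.foldl (fun m p => if p.1 then max m p.2 else m) a = max a (pvK rs) := by
  induction rs generalizing a with
  | nil => simp [pvK]; omega
  | cons p rs ih =>
    obtain ⟨k, n⟩ := p
    have hn : (1 : Int) ≤ n := by simpa using hpos (k, n) (by simp)
    have hrest : ∀ q ∈ rs, 1 ≤ q.2 := fun q hq => hpos q (by simp [hq])
    cases k with
    | true =>
      simp only [pvK, List.foldl_cons, if_true]
      rw [ih (max a n) (le_trans ha (le_max_left _ _)) hrest,
          ih (max 0 n) (le_max_left _ _) hrest]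
      have : max (0 : Int) n = n := by omega
      rw [this]
      -- max (max a n) (pvK rs) = max a (max n (pvK rs))
      omega
    | false =>
      simp only [pvK, List.foldl_cons, Bool.false_eq_true, if_false]
      exact ih a ha hrest

lemma pvK_cons_false (k : Bool) (n : Int) (rs : List (Bool × Int)) (hk : k = false) :
    pvK ((k, n) :: rs) = pvK rs := by
  subst hk; simp [pvK]

lemma pvK_cons_true (n : Int) (rs : List (Bool × Int)) (hn : 1 ≤ n)
    (hpos : ∀ p ∈ rs, 1 ≤ p.2) :
    pvK ((true, n) :: rs) = max n (pvK rs) := by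
  simp only [pvK, List.foldl_cons, if_true]
  have : max (0 : Int) n = n := by omega
  rw [this, pvK_init rs n (by omega) hpos]
  rfl

-- continuation-style reduction: an open left run of length c merges with the first run if it is a wildcard run
def pvKc (c : Int) (rs : List (Bool × Int)) : Int :=
  match rs with
  | (true, n) :: rest => max (c + n) (pvK rest)
  | rs => pvK rs

lemma pvH_eq_pvKc (xs : List (Option Int)) (c : Int) (hc : 0 ≤ c) :
    pvH c xs = pvKc c (pvGroupRuns xs) := by
  induction xs generalizing c with
  | nil => simp [pvH, pvGroupRuns, pvKc, pvK]
  | cons x t ih =>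
    cases x with
    | none =>
      simp only [pvH, pvGroupRuns, Option.isNone_none]
      rcases hruns : pvGroupRuns t with _ | ⟨⟨k, n⟩, more⟩
      · have h0 : pvH (c + 1) t = 0 := by
          have := ih (c + 1) (by omega); rw [hruns] at this; simpa [pvKc, pvK] using this
        simp [h0, pvKc, pvK]
      · have hn : (1 : Int) ≤ n := by
          simpa using pvGroupRuns_pos t (k, n) (by rw [hruns]; simp)
        have iht := ih (c + 1) (by omega)
        rw [hruns] at iht
        cases k with
        | true =>
          simp only [if_true]
          simp only [pvKc] at iht ⊢
          rw [iht]; omega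
        | false =>
          simp only [Bool.true_eq_false, if_false]
          simp only [pvKc] at iht ⊢
          rw [iht]
        
    | some v =>
      simp only [pvH, pvGroupRuns, Option.isNone_some]
      have iht := ih 0 le_rfl
      rcases hruns : pvGroupRuns t with _ | ⟨⟨k, n⟩, more⟩
      · rw [hruns] at iht
        simp [pvKc, pvK] at iht ⊢
        exact iht
      · rw [hruns] at iht
        have hn : (1 : Int) ≤ n := by
          simpa using pvGroupRuns_pos t (k, n) (by rw [hruns]; simp)
        have hmore : ∀ p ∈ more, 1 ≤ p.2 := fun p hp =>
          pvGroupRuns_pos t p (by rw [hruns]; simp [hp])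
        cases k with
        | true =>
          simp only [Bool.false_eq_true, if_false]
          simp only [pvKc] at iht ⊢
          rw [iht, pvK_cons_false false 1 _ rfl, pvK_cons_true n more hn hmore]
          omega
        | false =>
          simp only [if_true]
          simp only [pvKc] at iht ⊢
          rw [iht, pvK_cons_false false n more rfl, pvK_cons_false false (n+1) more rfl]

-- A's fold in terms of pvH
lemma pvA_fold (xs : List (Option Int)) (m c : Int) (hm : 0 ≤ m) :
    (xs.foldl
      (fun (st : Int × Int) byte =>
        match byte with
        | none => (max st.1 (st.2 + 1), st.2 + 1)
        | some _ => (st.1, 0)) (m, c)).1 = max m (pvH c xs) := by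
  induction xs generalizing m c with
  | nil => simp [pvH]; omega
  | cons x t ih =>
    cases x with
    | none =>
      simp only [List.foldl_cons, pvH]
      rw [ih (max m (c + 1)) (c + 1) (le_trans hm (le_max_left _ _))]
      omega
    | some v =>
      simp only [List.foldl_cons, pvH]
      exact ih m 0 hm

-- B in terms of pvK: the max-with-default over the filtered lengths equals the run reducer
lemma pvFoldMaxFilter (rs : List (Bool × Int)) (hpos : ∀ p ∈ rs, 1 ≤ p.2) :
    ∀ n : Int, 1 ≤ n →
      ((rs.filter (fun p => p.1)).map (fun p => p.2)).foldl max n = max n (pvK rs) := by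
  induction rs with
  | nil => intro n hn; simp [pvK]; omega
  | cons q rs ih =>
    intro n hn
    obtain ⟨kq, nq⟩ := q
    have hnq : (1 : Int) ≤ nq := by simpa using hpos (kq, nq) (by simp)
    have hrest : ∀ r ∈ rs, 1 ≤ r.2 := fun r hr => hpos r (by simp [hr])
    cases kq with
    | false =>
      rw [pvK_cons_false false nq rs rfl]
      simp only [List.filter_cons, Bool.false_eq_true, if_false]
      exact ih hrest n hn
    | true =>
      rw [pvK_cons_true nq rs hnq hrest]
      simp only [List.filter_cons, if_true, List.map_cons, List.foldl_cons]
      rw [ih hrest (max n nq) (le_trans hn (le_max_left _ _))]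
      omega

lemma pvMaxFilter (rs : List (Bool × Int)) (hpos : ∀ p ∈ rs, 1 ≤ p.2) :
    (PySem.List.max? ((rs.filter (fun p => p.1)).map (fun p => p.2)) (fun x => x)).getD 0
      = pvK rs := by
  induction rs with
  | nil => simp [PySem.List.max?, pvK]
  | cons p rs ih =>
    obtain ⟨k, n⟩ := p
    have hn : (1 : Int) ≤ n := by simpa using hpos (k, n) (by simp)
    have hrest : ∀ q ∈ rs, 1 ≤ q.2 := fun q hq => hpos q (by simp [hq])
    cases k with
    | false =>
      rw [pvK_cons_false false n rs rfl]
      simp only [List.filter_cons, Bool.false_eq_true, if_false]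
      exact ih hrest
    | true =>
      rw [pvK_cons_true n rs hn hrest]
      simp only [List.filter_cons, if_true, List.map_cons]
      rw [PySem.List.max?_id_cons]
      simp only [Option.getD_some]
      exact pvFoldMaxFilter rs hrest n hn

lemma pvB_eq_pvK (xs : List (Option Int)) :
    get_max_consecutive_wildcards_alt xs = pvK (pvGroupRuns xs) := by
  unfold get_max_consecutive_wildcards_alt
  exact pvMaxFilter (pvGroupRuns xs) (pvGroupRuns_pos xs)

-- ===== VERDICT (by name: the statement is the Claim_ definition above) =====
theorem get_max_consecutive_wildcards_spec : Claim_equal_get_max_consecutive_wildcards := by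
  intro xs _
  unfold Spec_get_max_consecutive_wildcards
  unfold get_max_consecutive_wildcards
  rw [pvA_fold xs 0 0 le_rfl, pvB_eq_pvK xs, pvH_eq_pvKc xs 0 le_rfl]
  rcases hrs : pvGroupRuns xs with _ | ⟨⟨k, n⟩, rest⟩
  · simp [pvKc, pvK]
  · have hn : (1 : Int) ≤ n := by
      simpa using pvGroupRuns_pos xs (k, n) (by rw [hrs]; simp)
    have hrest : ∀ p ∈ rest, 1 ≤ p.2 := fun p hp =>
      pvGroupRuns_pos xs p (by rw [hrs]; simp [hp])
    have hK : 0 ≤ pvK rest := by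
      have := pvK_init rest 0 le_rfl hrest
      simp [pvK] at this ⊢
      omega
    cases k with
    | true =>
      simp only [pvKc]
      rw [pvK_cons_true n rest hn hrest]
      omega
    | false =>
      simp only [pvKc]
      rw [pvK_cons_false false n rest rfl]
      have hK0 : 0 ≤ pvK ((false, n) :: rest) := by
        rw [pvK_cons_false false n rest rfl]; exact hK
      rw [pvK_cons_false false n rest rfl] at hK0
      omega
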